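-- pv_equiv track=rewrite | github.com/chadheyne/project-euler | problem4.py | generate_palindrome
-- ===== SOURCE A (Python) =====
-- def generate_palindrome(start):
--     if not 100 <= start <= 999:
--         return
--     pal = next((num for num in range(100, 1000)
--                 if str(num * start) == str(num * start)[::-1]), None)
--     if pal:
--         yield (pal, start)
--     yield from generate_palindrome(start - 1)
-- ===== SOURCE B (Python) =====
-- def generate_palindrome(start):
--     if 100 <= start <= 999:
--         hits = []
--         for s in range(100, start + 1):
--             pal = next((num for num in range(100, 1000)
--                         if str(num * s) == str(num * s)[::-1]), None)
--             if pal: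
--                 hits.append((pal, s))
--         yield from reversed(hits)
-- ===== Notes on version B (the rewrite author's own statement) =====
-- stated objective: alternative
-- what changed: Replaces the descending recursion (one generator frame per start value) with a single ascending loop that collects hits into a list and yields them reversed; the per-start recursive guard disappears, checked once up front.
import Mathlib
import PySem

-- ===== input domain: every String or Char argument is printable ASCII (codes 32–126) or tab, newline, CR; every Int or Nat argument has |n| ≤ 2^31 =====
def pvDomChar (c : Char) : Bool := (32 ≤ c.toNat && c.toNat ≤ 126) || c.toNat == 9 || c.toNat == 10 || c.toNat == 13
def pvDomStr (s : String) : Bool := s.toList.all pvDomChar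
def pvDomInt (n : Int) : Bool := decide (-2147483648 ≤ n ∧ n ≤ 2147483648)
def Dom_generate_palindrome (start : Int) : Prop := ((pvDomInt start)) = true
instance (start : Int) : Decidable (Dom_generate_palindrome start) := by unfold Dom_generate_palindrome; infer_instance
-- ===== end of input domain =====

-- B replaces A's descending recursion by one ascending collect-then-reverse loop (same cost, flat structure); return value only — both Pythons are generators.

-- shared helper: Python's `next((num for num in range(100, 1000) if str(num*s) == str(num*s)[::-1]), None)`
-- (this generator expression is textually identical in A and B; `s[::-1]` via PySem.Str.slice?, exact)
def pvFirstPal (s : Int) : Option Int :=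
  (PySem.List.pyRange 100 1000 1).find? (fun num =>
    PySem.Int.toStr (num * s)
      == (PySem.Str.slice? (PySem.Int.toStr (num * s)) none none (-1)).getD (PySem.Int.toStr (num * s)))

-- ===== PORT A =====
def generate_palindrome (start : Int) : List (Int × Int) :=
  if _h : 100 ≤ start ∧ start ≤ 999 then
    (match pvFirstPal start with         -- `if pal:` — truthy iff not None and ≠ 0
     | some p => if p ≠ 0 then [(p, start)] else []
     | none => []) ++ generate_palindrome (start - 1)
  else []
termination_by (start - 99).toNat
decreasing_by omega

-- ===== PORT B =====
def generate_palindrome_alt (start : Int) : List (Int × Int) :=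
  if 100 ≤ start ∧ start ≤ 999 then
    ((PySem.List.pyRange 100 (start + 1) 1).foldl
      (fun hits s =>
        match pvFirstPal s with           -- `if pal:` truthiness, then hits.append(...)
        | some p => if p ≠ 0 then hits ++ [(p, s)] else hits
        | none => hits) []).reverse
  else []

-- ===== PRECONDITION & SPEC =====
def Spec_generate_palindrome (start : Int) (out : List (Int × Int)) : Prop := out = generate_palindrome_alt start
instance (start : Int) (out : List (Int × Int)) : Decidable (Spec_generate_palindrome start out) := by unfold Spec_generate_palindrome; infer_instance

-- ===== CLAIM (what is proved, stated in full; the proofs are below) =====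
def Claim_equal_generate_palindrome : Prop := ∀ (start : Int), Dom_generate_palindrome start → Spec_generate_palindrome start (generate_palindrome start)

-- ===== LEMMAS AND PROOFS =====

-- the pair(s) produced for one value of `s` (proof-only abbreviation of both ports' match)
def pvHit (s : Int) : List (Int × Int) :=
  match pvFirstPal s with
  | some p => if p ≠ 0 then [(p, s)] else []
  | none => []

theorem pvHit_reverse (s : Int) : (pvHit s).reverse = pvHit s := by
  unfold pvHit
  cases hp : pvFirstPal s with
  | none => rfl
  | some p => by_cases h0 : p ≠ 0 <;> simp [h0]

theorem pvHitA (s : Int) :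
    (match pvFirstPal s with
     | some p => if p ≠ 0 then [(p, s)] else []
     | none => ([] : List (Int × Int))) = pvHit s := by
  unfold pvHit
  cases hp : pvFirstPal s <;> rfl

theorem pvStepFun_eq :
    (fun (hits : List (Int × Int)) (s : Int) =>
      match pvFirstPal s with
      | some p => if p ≠ 0 then hits ++ [(p, s)] else hits
      | none => hits) = (fun hits s => hits ++ pvHit s) := by
  funext hits s
  unfold pvHit
  cases hp : pvFirstPal s with
  | none => simp
  | some p => by_cases h0 : p ≠ 0 <;> simp [h0]

theorem pvA_eq_flatMap : ∀ (k : Nat) (start : Int), start - 99 ≤ (k : Int) → start ≤ 999 →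
    generate_palindrome start = ((PySem.List.pyRange 100 (start + 1) 1).flatMap pvHit).reverse := by
  intro k
  induction k with
  | zero =>
    intro start hk _
    rw [generate_palindrome, dif_neg (by omega), PySem.List.pyRange_one_eq_nil (by omega)]
    rfl
  | succ n ih =>
    intro start hk h999
    by_cases hc : 100 ≤ start
    · rw [generate_palindrome, dif_pos ⟨hc, h999⟩, pvHitA, ih (start - 1) (by omega) (by omega)]
      rw [PySem.List.pyRange_one_succ_right (by omega : (100:Int) ≤ start)]
      have hs : start - 1 + 1 = start := by omega
      rw [hs, List.flatMap_append, List.flatMap_cons, List.flatMap_nil, List.append_nil,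
        List.reverse_append, pvHit_reverse]
    · rw [generate_palindrome, dif_neg (by omega), PySem.List.pyRange_one_eq_nil (by omega)]
      rfl

-- ===== VERDICT (by name: the statement is the Claim_ definition above) =====
theorem generate_palindrome_spec : Claim_equal_generate_palindrome := by
  intro start _
  unfold Spec_generate_palindrome generate_palindrome_alt
  by_cases h : 100 ≤ start ∧ start ≤ 999
  · rw [if_pos h, pvA_eq_flatMap (start - 99).toNat start (by omega) h.2,
      pvStepFun_eq, PySem.List.foldl_append_eq_flatMap, List.nil_append]
  · rw [if_neg h, generate_palindrome, dif_neg h]
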